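-- pv_equiv track=rewrite | github.com/unaidedelf8777/lilac_built | src/signals/splitters/chunk_splitter.py | _sep_split
-- ===== SOURCE A (Python) =====
-- TextChunk = tuple[str, tuple[int, int]]
--
-- def _sep_split(text: str, separator: str) -> list[TextChunk]:
--   if separator == '':
--     # We need to split by char.
--     return [(letter, (i, i + 1)) for i, letter in enumerate(text)]
--
--   offset = 0
--   chunks: list[TextChunk] = []
--   end_index = text.find(separator, offset)
--
--   while end_index >= 0:
--     chunks.append((text[offset:end_index], (offset, end_index)))
--     offset = end_index + len(separator)
--     end_index = text.find(separator, offset)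
--
--   # Append the last chunk.
--   chunks.append((text[offset:], (offset, len(text))))
--
--   return chunks
-- ===== SOURCE B (Python) =====
-- def _sep_split(text: str, separator: str) -> list:
--   if separator == '':
--     # We need to split by char.
--     return [(letter, (i, i + 1)) for i, letter in enumerate(text)]
--
--   # Phase 1: one library call builds all the pieces.
--   pieces = text.split(separator)
--   # Phase 2: a cursor pass attaches the offset spans.
--   chunks = []
--   off = 0
--   for piece in pieces:
--     chunks.append((piece, (off, off + len(piece))))
--     off += len(piece) + len(separator)
--   return chunks
-- ===== Notes on version B (the rewrite author's own statement) =====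
-- stated objective: idiomatic
-- what changed: Replaces the interleaved find/slice/append while-loop with one text.split(separator) library call followed by a separate cursor pass that computes the offset spans from the piece lengths.
import Mathlib
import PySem

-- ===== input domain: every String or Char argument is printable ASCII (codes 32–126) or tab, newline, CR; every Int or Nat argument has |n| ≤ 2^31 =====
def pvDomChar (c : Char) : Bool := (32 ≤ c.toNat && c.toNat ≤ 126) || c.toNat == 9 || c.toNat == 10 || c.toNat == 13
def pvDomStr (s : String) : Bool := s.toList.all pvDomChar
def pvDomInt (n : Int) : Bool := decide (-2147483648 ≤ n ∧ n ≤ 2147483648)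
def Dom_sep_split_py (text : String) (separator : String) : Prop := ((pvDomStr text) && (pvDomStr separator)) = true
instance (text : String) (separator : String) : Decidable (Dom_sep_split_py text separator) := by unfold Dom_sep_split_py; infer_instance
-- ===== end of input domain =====

-- B replaces A's interleaved find/slice/append while-loop by one library split call
-- followed by a separate cursor pass attaching the offset spans (objective: idiomatic).

-- ===== PORT A =====
-- A's while-loop: find the separator from `offset`, append the slice, advance past the
-- separator; fuel = |text| + 1 only makes the recursion total (never exhausted on the
-- inputs reached, since each iteration advances offset by at least 1).
def sepA_go (t sep : List Char) : Nat → Nat → List (String × (Int × Int)) → List (String × (Int × Int))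
  | 0, _, chunks => chunks
  | fuel + 1, offset, chunks =>
    let e := PySem.Chars.findFrom t sep (offset : Int)
    if 0 ≤ e then
      sepA_go t sep fuel (e.toNat + sep.length)
        (chunks ++ [(String.ofList (PySem.Chars.slice t (some (offset : Int)) (some e)), ((offset : Int), e))])
    else
      chunks ++ [(String.ofList (PySem.Chars.slice t (some (offset : Int)) none), ((offset : Int), (t.length : Int)))]

def sep_split_py (text : String) (separator : String) : List (String × (Int × Int)) :=
  if separator = "" then
    (PySem.List.enumerate text.toList).map (fun p => (String.ofList [p.2], (p.1, p.1 + 1)))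
  else
    sepA_go text.toList separator.toList (text.toList.length + 1) 0 []

-- ===== PORT B =====
-- B's second pass: walk the pieces with an integer cursor `off`.
def sepB_go (sep : List Char) : List (List Char) → Nat → List (String × (Int × Int))
  | [], _ => []
  | p :: rest, off =>
    (String.ofList p, ((off : Int), ((off + p.length : Nat) : Int))) :: sepB_go sep rest (off + p.length + sep.length)

def sep_split_py_alt (text : String) (separator : String) : List (String × (Int × Int)) :=
  if separator = "" then
    (PySem.List.enumerate text.toList).map (fun p => (String.ofList [p.2], (p.1, p.1 + 1)))
  else
    sepB_go separator.toList (PySem.Chars.splitOn text.toList separator.toList) 0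

-- ===== PRECONDITION & SPEC =====
def Spec_sep_split_py (text : String) (separator : String) (out : List (String × (Int × Int))) : Prop := out = sep_split_py_alt text separator
instance (text : String) (separator : String) (out : List (String × (Int × Int))) : Decidable (Spec_sep_split_py text separator out) := by unfold Spec_sep_split_py; infer_instance

-- ===== CLAIM (what is proved, stated in full; the proofs are below) =====
def Claim_equal_sep_split_py : Prop := ∀ (text : String) (separator : String), Dom_sep_split_py text separator → Spec_sep_split_py text separator (sep_split_py text separator)

-- ===== LEMMAS AND PROOFS =====

-- canonical find-based chunk decomposition (fuelled), the common spec of both loops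
def chunksRec (sep : List Char) : Nat → List Char → List (List Char)
  | 0, l => [l]
  | fuel + 1, l =>
    if PySem.Chars.find l sep = -1 then [l]
    else (l.take (PySem.Chars.find l sep).toNat) ::
      chunksRec sep fuel (l.drop ((PySem.Chars.find l sep).toNat + sep.length))

theorem find_nil_of_ne {sep : List Char} (hsep : sep ≠ []) : PySem.Chars.find [] sep = -1 := by
  rw [PySem.Chars.find_eq_neg_one_iff]
  intro hi
  exact hsep (List.eq_nil_of_infix_nil hi)

theorem sep_len_le {sep l : List Char} (hnn : 0 ≤ PySem.Chars.find l sep) :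
    (PySem.Chars.find l sep).toNat + sep.length ≤ l.length := by
  obtain ⟨h1, -⟩ := PySem.Chars.find_spec hnn
  have h2 := h1.length_le
  have h3 := PySem.Chars.find_le_length l sep
  simp at h2
  omega

theorem chunksRec_fuel (sep : List Char) (hsep : sep ≠ []) :
    ∀ fuel fuel' l, l.length ≤ fuel → l.length ≤ fuel' →
      chunksRec sep fuel l = chunksRec sep fuel' l := by
  intro fuel
  induction fuel using Nat.strong_induction_on with
  | _ fuel ih =>
    intro fuel' l hl hl'
    match fuel, fuel' with
    | 0, 0 => rfl
    | 0, f' + 1 =>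
      have : l = [] := List.eq_nil_of_length_eq_zero (by omega)
      subst this
      simp [chunksRec, find_nil_of_ne hsep]
    | f + 1, 0 =>
      have : l = [] := List.eq_nil_of_length_eq_zero (by omega)
      subst this
      simp [chunksRec, find_nil_of_ne hsep]
    | f + 1, f' + 1 =>
      simp only [chunksRec]
      split_ifs with hf
      · rfl
      · have hnn : 0 ≤ PySem.Chars.find l sep := by
          have := PySem.Chars.neg_one_le_find l sep; omega
        have hlen := sep_len_le hnn
        have hs1 : sep.length ≥ 1 := List.length_pos_iff.2 hsep
        congr 1
        exact ih f (by omega) f' _ (by simp; omega) (by simp; omega)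

theorem find_eq_zero_of_prefix {sep l : List Char} (h : sep <+: l) : PySem.Chars.find l sep = 0 := by
  have hnn : 0 ≤ PySem.Chars.find l sep := (PySem.Chars.find_nonneg_iff l sep).2 h.isInfix
  obtain ⟨h1, h2⟩ := PySem.Chars.find_spec hnn
  rcases Nat.eq_zero_or_pos (PySem.Chars.find l sep).toNat with h0 | h0
  · omega
  · exact absurd (by simpa using h) (h2 0 h0)

theorem chunksRec_cons_not_prefix {sep : List Char} (hsep : sep ≠ []) {c : Char} {rest : List Char}
    (hfind : PySem.Chars.find (c :: rest) sep =
      (if PySem.Chars.find rest sep = -1 then -1 else 1 + PySem.Chars.find rest sep)) :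
    chunksRec sep (c :: rest).length (c :: rest) =
      List.modifyHead (fun x => c :: x) (chunksRec sep rest.length rest) := by
  by_cases hneg : PySem.Chars.find rest sep = -1
  · rw [if_pos hneg] at hfind
    simp only [List.length_cons, chunksRec, hfind]
    cases hr : rest with
    | nil => simp [chunksRec]
    | cons d ds =>
      rw [← hr]
      have : rest.length = (rest.length - 1) + 1 := by rw [hr]; simp
      rw [this]
      simp [chunksRec, hneg]
  · rw [if_neg hneg] at hfind
    have hg : 0 ≤ PySem.Chars.find rest sep := by
      have := PySem.Chars.neg_one_le_find rest sep; omega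
    obtain ⟨g, hgd⟩ : ∃ g : ℕ, PySem.Chars.find rest sep = (g : Int) :=
      ⟨_, (Int.toNat_of_nonneg hg).symm⟩
    have hrlen : g + sep.length ≤ rest.length := by
      have := sep_len_le (l := rest) (sep := sep) hg
      rwa [hgd, Int.toNat_natCast] at this
    have hs1 : 1 ≤ sep.length := List.length_pos_iff.2 hsep
    have hrpos : rest.length = (rest.length - 1) + 1 := by omega
    rw [hgd] at hfind
    simp only [List.length_cons, chunksRec, hfind]
    conv_rhs => rw [hrpos]
    simp only [chunksRec, hgd]
    have hne1 : ¬ ((1 : Int) + g = -1) := by omega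
    have hne2 : ¬ ((g : Int) = -1) := by omega
    rw [if_neg hne1, if_neg hne2]
    simp only [List.modifyHead]
    have ht1 : ((1 : Int) + g).toNat = g + 1 := by omega
    have ht2 : ((g : Int)).toNat = g := by omega
    rw [ht1, ht2]
    simp only [List.take_succ_cons]
    have hd : List.drop (g + 1 + sep.length) (c :: rest) = List.drop (g + sep.length) rest := by
      rw [show g + 1 + sep.length = (g + sep.length) + 1 by omega]
      simp
    rw [hd]
    congr 1
    exact chunksRec_fuel sep hsep rest.length (rest.length - 1)
      (List.drop (g + sep.length) rest)
      (by rw [List.length_drop]; omega) (by rw [List.length_drop]; omega)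

theorem infix_cons_iff' {sep : List Char} {c : Char} {rest : List Char} (h : ¬ sep <+: (c :: rest)) :
    sep <:+: (c :: rest) ↔ sep <:+: rest := by
  constructor
  · intro hi
    rw [← PySem.Chars.isIn_iff_infix, ← PySem.Chars.exists_prefix_drop_iff_isIn] at hi ⊢
    obtain ⟨j, hj⟩ := hi
    cases j with
    | zero => exact absurd (by simpa using hj) h
    | succ j => exact ⟨j, by simpa using hj⟩
  · intro hi
    exact hi.trans (List.suffix_cons c rest).isInfix

theorem find_cons_of_not_prefix {sep : List Char} {c : Char} {rest : List Char}
    (h : ¬ sep <+: (c :: rest)) :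
    PySem.Chars.find (c :: rest) sep =
      (if PySem.Chars.find rest sep = -1 then -1 else 1 + PySem.Chars.find rest sep) := by
  split_ifs with hneg
  · rw [PySem.Chars.find_eq_neg_one_iff] at hneg ⊢
    rw [infix_cons_iff' h]; exact hneg
  · have hg : 0 ≤ PySem.Chars.find rest sep := by
      have := PySem.Chars.neg_one_le_find rest sep; omega
    have hinf : sep <:+: (c :: rest) := by
      rw [infix_cons_iff' h, ← PySem.Chars.find_nonneg_iff]; exact hg
    have hnn : 0 ≤ PySem.Chars.find (c :: rest) sep := (PySem.Chars.find_nonneg_iff _ _).2 hinf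
    obtain ⟨m, hm⟩ : ∃ m : ℕ, PySem.Chars.find (c :: rest) sep = (m : Int) :=
      ⟨_, (Int.toNat_of_nonneg hnn).symm⟩
    obtain ⟨g, hgd⟩ : ∃ g : ℕ, PySem.Chars.find rest sep = (g : Int) :=
      ⟨_, (Int.toNat_of_nonneg hg).symm⟩
    obtain ⟨h1, h2⟩ := PySem.Chars.find_spec hnn
    obtain ⟨g1, g2⟩ := PySem.Chars.find_spec hg
    rw [hm] at h1 h2
    rw [hgd] at g1 g2
    simp only [Int.toNat_natCast] at h1 h2 g1 g2
    have hm0 : m ≠ 0 := by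
      intro h0; rw [h0] at h1; exact h (by simpa using h1)
    have hgle : g ≤ m - 1 := by
      by_contra hlt
      refine g2 (m - 1) (by omega) ?_
      have hd : List.drop m (c :: rest) = List.drop (m - 1) rest := by
        cases m with
        | zero => omega
        | succ k => simp
      rwa [hd] at h1
    have hmle : m ≤ g + 1 := by
      by_contra hlt
      exact h2 (g + 1) (by omega) (by simpa using g1)
    rw [hm, hgd]; omega

theorem chunksRec_ne_nil (sep : List Char) (fuel : Nat) (l : List Char) :
    chunksRec sep fuel l ≠ [] := by
  cases fuel with
  | zero => simp [chunksRec]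
  | succ f =>
    simp only [chunksRec]
    split_ifs <;> simp

theorem splitOn_go_eq (sep : List Char) (hsep : sep ≠ []) :
    ∀ fuel l cur acc, l.length ≤ fuel →
      PySem.Chars.splitOn.go sep (fuel + 1) l cur acc =
        acc.reverse ++ List.modifyHead (fun x => cur.reverse ++ x) (chunksRec sep l.length l) := by
  intro fuel
  induction fuel with
  | zero =>
    intro l cur acc hl
    have : l = [] := List.eq_nil_of_length_eq_zero (by omega)
    subst this
    simp [PySem.Chars.splitOn.go, chunksRec]
  | succ f ih =>
    intro l cur acc hl
    cases l with
    | nil => simp [PySem.Chars.splitOn.go, chunksRec]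
    | cons c rest =>
      by_cases hp : sep.isPrefixOf (c :: rest)
      · have hpre : sep <+: (c :: rest) := List.isPrefixOf_iff_prefix.1 hp
        have hstep : PySem.Chars.splitOn.go sep (f + 1 + 1) (c :: rest) cur acc =
            PySem.Chars.splitOn.go sep (f + 1) (List.drop sep.length (c :: rest)) [] (cur.reverse :: acc) := by
          simp [PySem.Chars.splitOn.go, hp]
        have hs1 : 1 ≤ sep.length := List.length_pos_iff.2 hsep
        have hslen : sep.length ≤ rest.length + 1 := by simpa using hpre.length_le
        have hl' : rest.length + 1 ≤ f + 1 := by simpa using hl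
        -- f+1 = g+1 form: need (drop).length ≤ f
        have hdlen : (List.drop sep.length (c :: rest)).length ≤ f := by
          rw [List.length_drop]; simp; omega
        rw [hstep]
        cases f with
        | zero =>
          have hd : List.drop sep.length (c :: rest) = [] := by
            apply List.eq_nil_of_length_eq_zero; omega
          rw [ih _ _ _ (by omega)]
          rw [hd]
          -- chunksRec of (c::rest): find = 0
          have hf0 : PySem.Chars.find (c :: rest) sep = 0 := find_eq_zero_of_prefix hpre
          simp only [List.length_cons, chunksRec, hf0]
          norm_num
          have hr0 : rest.length = 0 := by omega
          rw [hr0]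
          simp [chunksRec]
          omega
        | succ g =>
          rw [ih _ _ _ hdlen]
          have hf0 : PySem.Chars.find (c :: rest) sep = 0 := find_eq_zero_of_prefix hpre
          simp only [List.length_cons, chunksRec, hf0]
          norm_num
          rw [chunksRec_fuel sep hsep (rest.length) ((List.drop sep.length (c :: rest)).length)
            (List.drop sep.length (c :: rest)) (by rw [List.length_drop]; simp; omega) (le_refl _)]
          cases h : chunksRec sep (List.drop sep.length (c :: rest)).length (List.drop sep.length (c :: rest)) with
          | nil => exact absurd h (chunksRec_ne_nil _ _ _)
          | cons p ps =>
            rw [show rest.length + 1 - sep.length = (List.drop sep.length (c :: rest)).length by simp, h]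
            simp
      · have hnpre : ¬ sep <+: (c :: rest) := fun hc => hp (List.isPrefixOf_iff_prefix.2 hc)
        have hstep : PySem.Chars.splitOn.go sep (f + 1 + 1) (c :: rest) cur acc =
            PySem.Chars.splitOn.go sep (f + 1) rest (c :: cur) acc := by
          simp [PySem.Chars.splitOn.go, hp]
        rw [hstep, ih _ _ _ (by simpa using hl)]
        rw [chunksRec_cons_not_prefix hsep (find_cons_of_not_prefix hnpre)]
        cases h : chunksRec sep rest.length rest with
        | nil => exact absurd h (chunksRec_ne_nil _ _ _)
        | cons p ps => simp

theorem splitOn_eq_chunksRec (t sep : List Char) (hsep : sep ≠ []) :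
    PySem.Chars.splitOn t sep = chunksRec sep t.length t := by
  unfold PySem.Chars.splitOn
  rw [splitOn_go_eq sep hsep t.length t [] [] (le_refl _)]
  simp only [List.reverse_nil, List.nil_append]
  cases h : chunksRec sep t.length t with
  | nil => exact absurd h (chunksRec_ne_nil _ _ _)
  | cons p ps => simp

theorem sepA_go_eq (t sep : List Char) (hsep : sep ≠ []) :
    ∀ fuel offset chunks, offset ≤ t.length → t.length - offset ≤ fuel →
      sepA_go t sep (fuel + 1) offset chunks =
        chunks ++ sepB_go sep (chunksRec sep (t.drop offset).length (t.drop offset)) offset := by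
  intro fuel
  induction fuel using Nat.strong_induction_on with
  | _ fuel ih =>
    intro offset chunks hoff hfuel
    have hs1 : 1 ≤ sep.length := List.length_pos_iff.2 hsep
    have hff := PySem.Chars.findFrom_natCast t sep offset hoff
    by_cases hneg : PySem.Chars.find (List.drop offset t) sep = -1
    · rw [if_pos hneg] at hff
      have hdl : (List.drop offset t).length = t.length - offset := by simp
      simp only [sepA_go, hff]
      norm_num
      have hchunks : chunksRec sep (t.length - offset) (t.drop offset) = [t.drop offset] := by
        cases hc : t.length - offset with
        | zero =>
          have hnil : t.drop offset = [] := by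
            apply List.eq_nil_of_length_eq_zero; simp; omega
          rw [hnil]; simp [chunksRec]
        | succ k => simp [chunksRec, hneg]
      rw [hchunks]
      simp only [sepB_go]
      rw [show offset + (List.drop offset t).length = t.length from by simp; omega]
    · rw [if_neg hneg] at hff
      have hg : 0 ≤ PySem.Chars.find (List.drop offset t) sep := by
        have := PySem.Chars.neg_one_le_find (List.drop offset t) sep; omega
      obtain ⟨g, hgd⟩ : ∃ g : ℕ, PySem.Chars.find (List.drop offset t) sep = (g : Int) :=
        ⟨_, (Int.toNat_of_nonneg hg).symm⟩
      have hglen : g + sep.length ≤ (List.drop offset t).length := by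
        have := sep_len_le (l := List.drop offset t) (sep := sep) hg
        rwa [hgd, Int.toNat_natCast] at this
      have hdl : (List.drop offset t).length = t.length - offset := by simp
      rw [hgd] at hff
      have he : PySem.Chars.findFrom t sep (offset : Int) = ((offset + g : Nat) : Int) := by
        rw [hff]; push_cast; ring
      simp only [sepA_go, he]
      rw [if_pos (by positivity)]
      have htn : ((offset + g : Nat) : Int).toNat = offset + g := Int.toNat_natCast _
      rw [htn]
      have hsl : PySem.Chars.slice t (some (offset : Int)) (some ((offset + g : Nat) : Int)) =
          List.take g (List.drop offset t) := by
        have := PySem.List.slice_natCast t offset (offset + g)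
        simpa using this
      rw [hsl]
      -- new offset
      have hoff' : offset + g + sep.length ≤ t.length := by omega
      have hmeas : t.length - (offset + g + sep.length) ≤ fuel - 1 := by omega
      have hfuel1 : 1 ≤ fuel := by omega
      obtain ⟨f', rfl⟩ : ∃ f', fuel = f' + 1 := ⟨fuel - 1, by omega⟩
      rw [ih f' (by omega) (offset + g + sep.length) _ hoff' (by omega)]
      -- now expand chunksRec on the left
      have hlen1 : (t.drop offset).length = ((t.drop offset).length - 1) + 1 := by omega
      conv_rhs => rw [hlen1]
      simp only [chunksRec, hgd]
      rw [if_neg (by omega : ¬ ((g : Int) = -1)), Int.toNat_natCast]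
      simp only [sepB_go]
      have hdd : List.drop (g + sep.length) (List.drop offset t) = List.drop (offset + g + sep.length) t := by
        rw [List.drop_drop]; ring_nf
      have htk : (List.take g (List.drop offset t)).length = g := by
        rw [List.length_take]; omega
      rw [hdd, htk]
      rw [chunksRec_fuel sep hsep ((t.drop offset).length - 1) ((t.drop (offset + g + sep.length)).length)
        (List.drop (offset + g + sep.length) t) (by simp; omega) (le_refl _)]
      simp [List.append_assoc]

-- ===== VERDICT (by name: the statement is the Claim_ definition above) =====
theorem sep_split_py_spec : Claim_equal_sep_split_py := by
  intro text separator _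
  unfold Spec_sep_split_py sep_split_py sep_split_py_alt
  by_cases h : separator = ""
  · simp [h]
  · have hsep : separator.toList ≠ [] := by
      intro hn
      exact h (by simpa using congrArg String.ofList hn)
    simp only [if_neg h]
    have h0 : (0 : Nat) ≤ text.toList.length := Nat.zero_le _
    have := sepA_go_eq text.toList separator.toList hsep text.toList.length 0 [] h0 (by omega)
    rw [this, splitOn_eq_chunksRec _ _ hsep]
    simp
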